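-- pv_equiv track=rewrite | github.com/Blackmvmba88/controluniversal88 | python/auto_map.py | infer_mappings_from_labeled_reports
-- ===== SOURCE A (Python) =====
-- def _print_diff(prev, cur):
--     diffs = []
--     for i in range(max(len(prev), len(cur))):
--         a = prev[i] if i < len(prev) else 0
--         b = cur[i] if i < len(cur) else 0
--         if a != b:
--             diffs.append({'idx': i, 'before': a, 'after': b, 'xor': a ^ b})
--     return diffs
--
-- def _choose_candidate_from_diffs(diffs):
--     if not diffs:
--         return None
--     # prefer diffs whose xor is a single bit
--     for d in diffs:
--         xor = d.get('xor', 0)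
--         if xor and (xor & (xor - 1)) == 0:
--             return {'idx': d['idx'], 'xor': xor}
--     # else return the diff with smallest number of bits set
--     def popcount(x):
--         return bin(x).count('1')
--     best = diffs[0]
--     best_count = popcount(best.get('xor', 0))
--     for d in diffs[1:]:
--         c = popcount(d.get('xor', 0))
--         if c < best_count:
--             best = d
--             best_count = c
--     return {'idx': best['idx'], 'xor': best['xor']}
--
-- def infer_button_mappings(observed_diffs_by_button):
--     mapping = {}
--     for btn, attempts in observed_diffs_by_button.items():
--         candidates = []
--         for diffs in attempts:
--             for d in diffs:
--                 candidates.append(d)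
--         choice = _choose_candidate_from_diffs(candidates)
--         if choice:
--             mapping[btn] = [choice['idx'], choice['xor']]
--     return mapping
--
-- def infer_mappings_from_labeled_reports(labeled_pairs):
--     # labeled_pairs: list of (label, before, after)
--     per_label = {}
--     for p in labeled_pairs:
--         label, before, after = p
--         diffs = _print_diff(before, after)
--         if label not in per_label:
--             per_label[label] = []
--         per_label[label].append(diffs)
--     return infer_button_mappings(per_label)
-- ===== SOURCE B (Python) =====
-- def infer_mappings_from_labeled_reports(labeled_pairs):
--     # Online selection in one pass: per label keep only the best candidate seen so
--     # far, ranked by the tuple key (0,0) for a single-bit xor else (1, popcount);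
--     # no per-label diff lists are ever materialized (O(1) state per label).
--     best = {}
--     for label, before, after in labeled_pairs:
--         if label not in best:
--             best[label] = None
--         for i in range(max(len(before), len(after))):
--             a = before[i] if i < len(before) else 0
--             b = after[i] if i < len(after) else 0
--             if a == b:
--                 continue
--             x = a ^ b
--             if x != 0 and x & (x - 1) == 0:
--                 key = (0, 0)
--             else:
--                 key = (1, bin(x).count('1'))
--             cur = best[label]
--             if cur is None or key < cur[0]:
--                 best[label] = (key, i, x)
--     return {label: [v[1], v[2]] for label, v in best.items() if v is not None}
-- ===== Notes on version B (the rewrite author's own statement) =====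
-- stated objective: alternative
-- what changed: B replaces A's two-phase pipeline (group all diff records into per-label lists of lists, then per label scan once for a single-bit xor and again for the min-popcount record) with a single streaming pass that keeps only one best (key, idx, xor) triple per label, updating it online with a strict tuple-key comparison, so no diff lists are ever materialized.
import Mathlib
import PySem

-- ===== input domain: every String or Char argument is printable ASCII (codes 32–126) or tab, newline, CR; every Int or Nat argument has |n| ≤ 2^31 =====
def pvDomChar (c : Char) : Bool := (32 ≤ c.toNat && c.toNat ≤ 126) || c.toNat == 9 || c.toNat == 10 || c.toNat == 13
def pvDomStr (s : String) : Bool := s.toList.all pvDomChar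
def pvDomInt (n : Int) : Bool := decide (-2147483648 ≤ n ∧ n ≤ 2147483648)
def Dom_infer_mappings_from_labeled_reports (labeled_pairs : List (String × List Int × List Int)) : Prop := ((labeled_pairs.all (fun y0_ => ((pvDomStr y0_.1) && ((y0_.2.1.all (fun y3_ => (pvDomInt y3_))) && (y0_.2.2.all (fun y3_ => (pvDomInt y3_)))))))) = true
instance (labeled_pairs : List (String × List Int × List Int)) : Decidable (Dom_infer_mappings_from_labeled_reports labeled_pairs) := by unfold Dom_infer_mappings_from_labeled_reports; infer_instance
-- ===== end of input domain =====

-- B replaces A's two-phase pipeline (group per-label lists of diff records, then a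
-- single-bit scan plus a min-popcount scan per label) by ONE streaming pass that keeps
-- only the best (key, idx, xor) triple per label; alternative decomposition, same results.

-- ===== PORT A =====
structure PvDiff where
  idx : Int
  before : Int
  after : Int
  xor : Int
deriving DecidableEq, Repr

-- _print_diff(prev, cur); indices from range are in bounds, so pyGetD's default is never used
def pv_print_diff (prev cur : List Int) : List PvDiff :=
  (PySem.List.pyRange 0 (max (PySem.List.len prev) (PySem.List.len cur)) 1).foldl
    (fun diffs i =>
      let a := if i < PySem.List.len prev then PySem.List.pyGetD prev i 0 else 0
      let b := if i < PySem.List.len cur then PySem.List.pyGetD cur i 0 else 0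
      if a ≠ b then diffs ++ [⟨i, a, b, PySem.Int.bxor a b⟩] else diffs) []

-- _choose_candidate_from_diffs(diffs); the for-loop with early return is List.find?,
-- popcount(x) = bin(x).count('1') is PySem.Int.bitCount (reads |x|, Python-exact)
def pv_choose_candidate (diffs : List PvDiff) : Option (Int × Int) :=
  match diffs with
  | [] => none
  | d0 :: rest =>
    match (d0 :: rest).find? (fun d => d.xor != 0 && PySem.Int.band d.xor (d.xor - 1) == 0) with
    | some d => some (d.idx, d.xor)
    | none =>
      let r := rest.foldl (fun acc d =>
          let c := PySem.Int.bitCount d.xor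
          if c < acc.2 then (d, c) else acc)
        (d0, PySem.Int.bitCount d0.xor)
      some (r.1.idx, r.1.xor)

-- infer_button_mappings(observed_diffs_by_button)
def pv_infer_button_mappings (observed : PySem.Dict String (List (List PvDiff))) :
    PySem.Dict String (List Int) :=
  observed.items.foldl (fun mapping p =>
    let candidates := p.2.foldl (fun cs diffs => diffs.foldl (fun cs d => cs ++ [d]) cs) []
    match pv_choose_candidate candidates with
    | some c => mapping.insert p.1 [c.1, c.2]
    | none => mapping) PySem.Dict.empty

def infer_mappings_from_labeled_reports (labeled_pairs : List (String × List Int × List Int)) :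
    List (String × List Int) :=
  let per_label := labeled_pairs.foldl (fun d p =>
    let diffs := pv_print_diff p.2.1 p.2.2
    -- "if label not in per_label: per_label[label] = []" then "per_label[label].append(diffs)"
    let d' := if d.contains p.1 then d else d.insert p.1 []
    d'.modify p.1 [] (· ++ [diffs])) PySem.Dict.empty
  (pv_infer_button_mappings per_label).items

-- ===== PORT B =====
-- Python's '<' on int 2-tuples is lexicographic; ported componentwise by hand (exact here)
def pvKeyLt (p q : Int × Int) : Bool := p.1 < q.1 || (p.1 == q.1 && p.2 < q.2)

def infer_mappings_from_labeled_reports_alt (labeled_pairs : List (String × List Int × List Int)) :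
    List (String × List Int) :=
  let best := labeled_pairs.foldl (fun best p =>
    -- "if label not in best: best[label] = None"
    let best := if best.contains p.1 then best else best.insert p.1 none
    (PySem.List.pyRange 0 (max (PySem.List.len p.2.1) (PySem.List.len p.2.2)) 1).foldl
      (fun best i =>
        let a := if i < PySem.List.len p.2.1 then PySem.List.pyGetD p.2.1 i 0 else 0
        let b := if i < PySem.List.len p.2.2 then PySem.List.pyGetD p.2.2 i 0 else 0
        if a = b then best
        else
          let x := PySem.Int.bxor a b
          let key : Int × Int :=
            if x ≠ 0 ∧ PySem.Int.band x (x - 1) = 0 then (0, 0)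
            else (1, (PySem.Int.bitCount x : Int))
          -- "cur = best[label]; if cur is None or key < cur[0]: best[label] = (key, i, x)"
          match best.getD p.1 none with
          | none => best.insert p.1 (some (key, i, x))
          | some cur =>
            if pvKeyLt key cur.1 then best.insert p.1 (some (key, i, x)) else best)
      best)
    (PySem.Dict.empty : PySem.Dict String (Option ((Int × Int) × Int × Int)))
  -- "{label: [v[1], v[2]] for label, v in best.items() if v is not None}"
  (best.items.foldl (fun m q =>
      match q.2 with
      | some v => m.insert q.1 [v.2.1, v.2.2]
      | none => m)
    (PySem.Dict.empty : PySem.Dict String (List Int))).items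

-- ===== PRECONDITION & SPEC =====
def Spec_infer_mappings_from_labeled_reports (labeled_pairs : List (String × List Int × List Int)) (out : List (String × List Int)) : Prop := out = infer_mappings_from_labeled_reports_alt labeled_pairs
instance (labeled_pairs : List (String × List Int × List Int)) (out : List (String × List Int)) : Decidable (Spec_infer_mappings_from_labeled_reports labeled_pairs out) := by unfold Spec_infer_mappings_from_labeled_reports; infer_instance

-- ===== CLAIM (what is proved, stated in full; the proofs are below) =====
def Claim_equal_infer_mappings_from_labeled_reports : Prop := ∀ (labeled_pairs : List (String × List Int × List Int)), Dom_infer_mappings_from_labeled_reports labeled_pairs → Spec_infer_mappings_from_labeled_reports labeled_pairs (infer_mappings_from_labeled_reports labeled_pairs)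

-- ===== LEMMAS AND PROOFS =====
def pvKey (x : Int) : Int × Int :=
  if x ≠ 0 ∧ PySem.Int.band x (x - 1) = 0 then (0, 0) else (1, (PySem.Int.bitCount x : Int))
def pvG (d : PvDiff) : Int × Int := (d.idx, d.xor)
def pvGA (p : String × List Int × List Int) : List PvDiff := pv_print_diff p.2.1 p.2.2
def pvSingleB (d : PvDiff) : Bool := d.xor != 0 && PySem.Int.band d.xor (d.xor - 1) == 0
def pvStep (m d : PvDiff) : PvDiff := if pvKeyLt (pvKey d.xor) (pvKey m.xor) then d else m
def pvStepA (m d : PvDiff) : PvDiff :=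
  if PySem.Int.bitCount d.xor < PySem.Int.bitCount m.xor then d else m
def pvOStep (v : Option ((Int × Int) × Int × Int)) (e : Int × Int) :
    Option ((Int × Int) × Int × Int) :=
  match v with
  | none => some (pvKey e.2, e.1, e.2)
  | some cur => if pvKeyLt (pvKey e.2) cur.1 then some (pvKey e.2, e.1, e.2) else cur

theorem pv_key_single (d : PvDiff) (h : pvSingleB d = true) : pvKey d.xor = (0, 0) := by
  simp only [pvSingleB, Bool.and_eq_true, bne_iff_ne, beq_iff_eq] at h
  simp [pvKey, h.1, h.2]

theorem pv_key_not_single (d : PvDiff) (h : pvSingleB d = false) :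
    pvKey d.xor = (1, (PySem.Int.bitCount d.xor : Int)) := by
  simp only [pvSingleB, Bool.and_eq_false_iff, bne_eq_false_iff_eq, beq_eq_false_iff_ne] at h
  unfold pvKey
  rcases h with h | h
  · simp [h]
  · rw [if_neg (by tauto)]

theorem pv_step_single (m d : PvDiff) (h : pvSingleB m = true) : pvStep m d = m := by
  unfold pvStep
  rw [pv_key_single m h]
  by_cases hd : pvSingleB d = true
  · rw [pv_key_single d hd]; simp [pvKeyLt]
  · rw [pv_key_not_single d (by simpa using hd)]; simp [pvKeyLt]

theorem pv_step_cases (m d : PvDiff) (hm : pvSingleB m = false) :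
    pvStep m d = if pvSingleB d then d else pvStepA m d := by
  unfold pvStep pvStepA
  rw [pv_key_not_single m hm]
  by_cases hd : pvSingleB d = true
  · rw [pv_key_single d hd, hd]; simp [pvKeyLt]
  · rw [pv_key_not_single d (by simpa using hd)]
    simp only [hd]
    simp [pvKeyLt, Nat.cast_lt]

theorem pv_foldl_single (t : List PvDiff) (m : PvDiff) (h : pvSingleB m = true) :
    t.foldl pvStep m = m := by
  induction t with
  | nil => rfl
  | cons d t ih => simpa [List.foldl_cons, pv_step_single m d h] using ih

theorem pv_stepA_not_single (m d : PvDiff) (hm : pvSingleB m = false) (hd : pvSingleB d = false) :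
    pvSingleB (pvStepA m d) = false := by
  unfold pvStepA; split <;> assumption

theorem pv_foldl_char (t : List PvDiff) (m : PvDiff) (hm : pvSingleB m = false) :
    t.foldl pvStep m = (match t.find? pvSingleB with
      | some x => x
      | none => t.foldl pvStepA m) := by
  induction t generalizing m with
  | nil => rfl
  | cons d t ih =>
    by_cases hd : pvSingleB d = true
    · rw [List.find?_cons_of_pos hd]
      simp only [List.foldl_cons, pv_step_cases m d hm, hd, if_true]
      exact pv_foldl_single t d hd
    · simp only [Bool.not_eq_true] at hd
      rw [List.find?_cons_of_neg (by simp [hd])]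
      simp only [List.foldl_cons, pv_step_cases m d hm, hd, Bool.false_eq_true, if_false]
      exact ih (pvStepA m d) (pv_stepA_not_single m d hm hd)

theorem pv_foldA (t : List PvDiff) (m : PvDiff) :
    t.foldl (fun acc d =>
        let c := PySem.Int.bitCount d.xor
        if c < acc.2 then (d, c) else acc) (m, PySem.Int.bitCount m.xor)
      = (t.foldl pvStepA m, PySem.Int.bitCount (t.foldl pvStepA m).xor) := by
  induction t generalizing m with
  | nil => rfl
  | cons d t ih =>
    simp only [List.foldl_cons]
    rw [show (let c := PySem.Int.bitCount d.xor
        if c < PySem.Int.bitCount m.xor then (d, c) else (m, PySem.Int.bitCount m.xor))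
      = (pvStepA m d, PySem.Int.bitCount (pvStepA m d).xor) from by
        simp only [pvStepA]; split <;> rfl]
    exact ih (pvStepA m d)

theorem pv_choose_char (l : List PvDiff) :
    pv_choose_candidate l = (match l with
      | [] => none
      | d :: t => some (pvG (t.foldl pvStep d))) := by
  cases l with
  | nil => rfl
  | cons d t =>
    unfold pv_choose_candidate
    have hP : (fun d : PvDiff => d.xor != 0 && PySem.Int.band d.xor (d.xor - 1) == 0) = pvSingleB := rfl
    rw [hP]
    show (match List.find? pvSingleB (d :: t) with
      | some x => some (x.idx, x.xor)
      | none =>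
        let r := List.foldl (fun acc d =>
          let c := PySem.Int.bitCount d.xor
          if c < acc.2 then (d, c) else acc) (d, PySem.Int.bitCount d.xor) t
        some (r.1.idx, r.1.xor)) = some (pvG (t.foldl pvStep d))
    cases hfind : List.find? pvSingleB (d :: t) with
    | some x =>
      suffices h : t.foldl pvStep d = x by simp [h, pvG]
      by_cases hd : pvSingleB d = true
      · rw [List.find?_cons_of_pos hd] at hfind
        cases hfind
        exact pv_foldl_single t d hd
      · simp only [Bool.not_eq_true] at hd
        rw [List.find?_cons_of_neg (by simp [hd])] at hfind
        rw [pv_foldl_char t d hd, hfind]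
    | none =>
      have hd : pvSingleB d = false := by
        by_contra h
        rw [List.find?_cons_of_pos (by simpa using h)] at hfind
        cases hfind
      have ht : List.find? pvSingleB t = none := by
        rw [List.find?_cons_of_neg (by simp [hd])] at hfind
        exact hfind
      rw [pv_foldl_char t d hd, ht]
      simp only [pv_foldA]
      rfl

-- ===== A-side grouping characterisation (as filters over the input) =====
def pvDictA (lp : List (String × List Int × List Int)) : PySem.Dict String (List (List PvDiff)) :=
  lp.foldl (fun d p =>
    let diffs := pv_print_diff p.2.1 p.2.2
    let d' := if d.contains p.1 then d else d.insert p.1 []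
    d'.modify p.1 [] (· ++ [diffs])) PySem.Dict.empty

theorem pv_bridge (d : PySem.Dict String (List (List PvDiff))) (k : String)
    (f : List (List PvDiff) → List (List PvDiff)) :
    ((if d.contains k then d else d.insert k []).modify k [] f) = d.modify k [] f := by
  by_cases h : d.contains k = true
  · rw [if_pos h]
  · have h' : d.contains k = false := by simpa using h
    rw [if_neg (by simp [h'])]
    simp only [PySem.Dict.modify]
    have hg : d.getD k [] = [] := PySem.Dict.getD_of_not_contains d [] h'
    rw [PySem.Dict.getD_insert_self, PySem.Dict.insert_insert_self, hg]

theorem pv_groupD {γ : Type} (g : String × List Int × List Int → List γ)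
    (l : List (String × List Int × List Int)) :
    ∀ (d : PySem.Dict String (List γ)) (c : String),
    (l.foldl (fun d p => d.modify p.1 [] (· ++ g p)) d).getD c []
      = d.getD c [] ++ (l.filter (fun p => p.1 == c)).flatMap g := by
  induction l with
  | nil => intro d c; simp
  | cons p l ih =>
    intro d c
    simp only [List.foldl_cons, ih, List.filter_cons]
    by_cases h : p.1 = c
    · simp [h, List.append_assoc]
    · simp [PySem.Dict.getD_modify, Ne.symm h, h]

theorem pv_dictA_modify (lp : List (String × List Int × List Int)) :
    pvDictA lp = lp.foldl (fun d p => d.modify p.1 [] (· ++ [pvGA p])) PySem.Dict.empty := by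
  unfold pvDictA
  congr 1
  funext d p
  exact pv_bridge d p.1 (· ++ [pvGA p])

theorem pv_cand_app (ll : List (List PvDiff)) : ∀ (init : List PvDiff),
    ll.foldl (fun cs diffs => cs ++ diffs) init = init ++ ll.flatten := by
  induction ll with
  | nil => intro init; simp
  | cons xs ll ih =>
    intro init
    simp only [List.foldl_cons]
    rw [ih (init ++ xs), List.flatten_cons, List.append_assoc]

theorem pv_cand (ll : List (List PvDiff)) (init : List PvDiff) :
    ll.foldl (fun cs diffs => diffs.foldl (fun cs d => cs ++ [d]) cs) init = init ++ ll.flatten := by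
  rw [show (fun (cs : List PvDiff) (diffs : List PvDiff) => diffs.foldl (fun cs d => cs ++ [d]) cs)
      = (fun cs diffs => cs ++ diffs) from by
        funext cs diffs; exact PySem.List.foldl_append_singleton diffs cs]
  exact pv_cand_app ll init

-- ===== B-side: the streaming fold, per key =====
def pvE (a b : Int → Int) (R : List Int) : List (Int × Int) :=
  R.filterMap (fun i => if a i = b i then none else some (i, PySem.Int.bxor (a i) (b i)))

def pvRec (a b : Int → Int) (R : List Int) : List PvDiff :=
  R.filterMap (fun i => if a i = b i then none else some ⟨i, a i, b i, PySem.Int.bxor (a i) (b i)⟩)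

theorem pvE_cons_eq (a b : Int → Int) (i : Int) (R : List Int) (h : a i = b i) :
    pvE a b (i :: R) = pvE a b R := by
  simp [pvE, h]

theorem pvE_cons_ne (a b : Int → Int) (i : Int) (R : List Int) (h : ¬ a i = b i) :
    pvE a b (i :: R) = (i, PySem.Int.bxor (a i) (b i)) :: pvE a b R := by
  simp [pvE, h]

theorem pv_rec_fold (a b : Int → Int) (R : List Int) : ∀ (init : List PvDiff),
    R.foldl (fun diffs i =>
        if a i ≠ b i then diffs ++ [⟨i, a i, b i, PySem.Int.bxor (a i) (b i)⟩] else diffs) init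
      = init ++ pvRec a b R := by
  induction R with
  | nil => intro init; simp [pvRec]
  | cons i R ih =>
    intro init
    simp only [List.foldl_cons, pvRec, List.filterMap_cons]
    by_cases h : a i = b i
    · rw [if_neg (by simpa using h), if_pos h]
      exact ih init
    · rw [if_pos h, if_neg h, ih (init ++ _)]
      simp [pvRec, List.append_assoc]

theorem pv_rec_map (a b : Int → Int) (R : List Int) :
    (pvRec a b R).map pvG = pvE a b R := by
  unfold pvRec pvE
  rw [List.map_filterMap]
  congr 1
  funext i
  by_cases h : a i = b i <;> simp [h, pvG]

theorem pv_print_eq (prev cur : List Int) :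
    pv_print_diff prev cur
      = pvRec (fun i => if i < PySem.List.len prev then PySem.List.pyGetD prev i 0 else 0)
              (fun i => if i < PySem.List.len cur then PySem.List.pyGetD cur i 0 else 0)
              (PySem.List.pyRange 0 (max (PySem.List.len prev) (PySem.List.len cur)) 1) := by
  unfold pv_print_diff
  rw [pv_rec_fold]
  simp

-- the inner per-report loop of B, at the dict level
def pvBInner (k : String) (a b : Int → Int) (R : List Int)
    (d : PySem.Dict String (Option ((Int × Int) × Int × Int))) :
    PySem.Dict String (Option ((Int × Int) × Int × Int)) :=
  R.foldl (fun best i =>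
      if a i = b i then best
      else
        match best.getD k none with
        | none => best.insert k (some (pvKey (PySem.Int.bxor (a i) (b i)), i, PySem.Int.bxor (a i) (b i)))
        | some cur =>
          if pvKeyLt (pvKey (PySem.Int.bxor (a i) (b i))) cur.1 then
            best.insert k (some (pvKey (PySem.Int.bxor (a i) (b i)), i, PySem.Int.bxor (a i) (b i)))
          else best) d

theorem pvBInner_cons (k : String) (a b : Int → Int) (i : Int) (R : List Int)
    (d : PySem.Dict String (Option ((Int × Int) × Int × Int))) :
    pvBInner k a b (i :: R) d
      = pvBInner k a b R
          (if a i = b i then d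
           else
             match d.getD k none with
             | none => d.insert k (some (pvKey (PySem.Int.bxor (a i) (b i)), i, PySem.Int.bxor (a i) (b i)))
             | some cur =>
               if pvKeyLt (pvKey (PySem.Int.bxor (a i) (b i))) cur.1 then
                 d.insert k (some (pvKey (PySem.Int.bxor (a i) (b i)), i, PySem.Int.bxor (a i) (b i)))
               else d) := rfl

theorem pvBInner_getD_self (k : String) (a b : Int → Int) (R : List Int) :
    ∀ d, (pvBInner k a b R d).getD k none = (pvE a b R).foldl pvOStep (d.getD k none) := by
  induction R with
  | nil => intro d; rfl
  | cons i R ih =>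
    intro d
    rw [pvBInner_cons]
    by_cases h : a i = b i
    · rw [if_pos h, pvE_cons_eq a b i R h]
      exact ih d
    · rw [if_neg h, pvE_cons_ne a b i R h, List.foldl_cons, ih]
      congr 1
      cases hg : d.getD k none with
      | none => simp only [pvOStep, PySem.Dict.getD_insert_self]
      | some cur =>
        simp only [pvOStep]
        by_cases hlt : pvKeyLt (pvKey (PySem.Int.bxor (a i) (b i))) cur.1 = true
        · simp only [hlt, if_true, PySem.Dict.getD_insert_self]
        · simp only [Bool.not_eq_true] at hlt
          simp only [hlt, Bool.false_eq_true, if_false]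
          exact hg

theorem pvBInner_getD_ne (k : String) (a b : Int → Int) (R : List Int) (c : String) (hc : c ≠ k) :
    ∀ d, (pvBInner k a b R d).getD c none = d.getD c none := by
  induction R with
  | nil => intro d; rfl
  | cons i R ih =>
    intro d
    rw [pvBInner_cons]
    by_cases h : a i = b i
    · rw [if_pos h]; exact ih d
    · rw [if_neg h]
      cases hg : d.getD k none with
      | none =>
        simp only []
        rw [ih _, PySem.Dict.getD_insert_of_ne _ _ _ hc]
      | some cur =>
        simp only []
        by_cases hlt : pvKeyLt (pvKey (PySem.Int.bxor (a i) (b i))) cur.1 = true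
        · simp only [hlt, if_true]
          rw [ih _, PySem.Dict.getD_insert_of_ne _ _ _ hc]
        · simp only [Bool.not_eq_true] at hlt
          simp only [hlt, Bool.false_eq_true, if_false]
          exact ih d

theorem pvBInner_keys (k : String) (a b : Int → Int) (R : List Int) :
    ∀ d, d.contains k = true → (pvBInner k a b R d).keys = d.keys := by
  induction R with
  | nil => intro d _; rfl
  | cons i R ih =>
    intro d hk
    rw [pvBInner_cons]
    by_cases h : a i = b i
    · rw [if_pos h]; exact ih d hk
    · rw [if_neg h]
      cases hg : d.getD k none with
      | none =>
        simp only []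
        rw [ih _ (by simp [PySem.Dict.contains_insert_self]),
          PySem.Dict.keys_insert_of_contains _ _ hk]
      | some cur =>
        simp only []
        by_cases hlt : pvKeyLt (pvKey (PySem.Int.bxor (a i) (b i))) cur.1 = true
        · simp only [hlt, if_true]
          rw [ih _ (by simp [PySem.Dict.contains_insert_self]),
            PySem.Dict.keys_insert_of_contains _ _ hk]
        · simp only [Bool.not_eq_true] at hlt
          simp only [hlt, Bool.false_eq_true, if_false]
          exact ih d hk

def pvBStep (p : String × List Int × List Int)
    (best : PySem.Dict String (Option ((Int × Int) × Int × Int))) :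
    PySem.Dict String (Option ((Int × Int) × Int × Int)) :=
  pvBInner p.1
    (fun i => if i < PySem.List.len p.2.1 then PySem.List.pyGetD p.2.1 i 0 else 0)
    (fun i => if i < PySem.List.len p.2.2 then PySem.List.pyGetD p.2.2 i 0 else 0)
    (PySem.List.pyRange 0 (max (PySem.List.len p.2.1) (PySem.List.len p.2.2)) 1)
    (if best.contains p.1 then best else best.insert p.1 none)

def pvBestD (lp : List (String × List Int × List Int)) :
    PySem.Dict String (Option ((Int × Int) × Int × Int)) :=
  lp.foldl (fun best p => pvBStep p best) PySem.Dict.empty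

theorem pv_alt_eq (lp : List (String × List Int × List Int)) :
    infer_mappings_from_labeled_reports_alt lp
      = ((pvBestD lp).items.foldl (fun m q =>
            match q.2 with
            | some v => m.insert q.1 [v.2.1, v.2.2]
            | none => m)
          (PySem.Dict.empty : PySem.Dict String (List Int))).items := rfl

def pvEP (p : String × List Int × List Int) : List (Int × Int) :=
  pvE (fun i => if i < PySem.List.len p.2.1 then PySem.List.pyGetD p.2.1 i 0 else 0)
      (fun i => if i < PySem.List.len p.2.2 then PySem.List.pyGetD p.2.2 i 0 else 0)
      (PySem.List.pyRange 0 (max (PySem.List.len p.2.1) (PySem.List.len p.2.2)) 1)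

theorem pvEP_eq_map (p : String × List Int × List Int) : pvEP p = (pvGA p).map pvG := by
  rw [pvEP, pvGA, pv_print_eq, pv_rec_map]

theorem pvBStep_getD (p : String × List Int × List Int)
    (best : PySem.Dict String (Option ((Int × Int) × Int × Int))) (c : String) :
    (pvBStep p best).getD c none
      = if p.1 = c then (pvEP p).foldl pvOStep (best.getD c none) else best.getD c none := by
  have hguard : ∀ c', (if best.contains p.1 then best else best.insert p.1 none).getD c' none
      = best.getD c' none := by
    intro c'
    by_cases h : best.contains p.1 = true
    · rw [if_pos h]
    · rw [if_neg (by simpa using h)]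
      by_cases hc' : c' = p.1
      · subst hc'
        rw [PySem.Dict.getD_insert_self,
          PySem.Dict.getD_of_not_contains best none (by simpa using h)]
      · rw [PySem.Dict.getD_insert_of_ne _ _ _ hc']
  by_cases hpc : p.1 = c
  · subst hpc
    rw [if_pos rfl, pvBStep, pvBInner_getD_self, hguard]
    rfl
  · rw [if_neg hpc, pvBStep, pvBInner_getD_ne _ _ _ _ _ (fun h => hpc h.symm), hguard]

theorem pvBStep_keys (p : String × List Int × List Int)
    (best : PySem.Dict String (Option ((Int × Int) × Int × Int))) :
    (pvBStep p best).keys = PySem.Set.add best.keys p.1 := by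
  rw [pvBStep]
  by_cases h : best.contains p.1 = true
  · rw [if_pos h, pvBInner_keys _ _ _ _ _ h]
    have hmem : p.1 ∈ best.keys := (PySem.Dict.contains_iff_mem_keys _ _).mp h
    simp [PySem.Set.add, hmem]
  · have h' : best.contains p.1 = false := by simpa using h
    rw [if_neg (by simp [h']), pvBInner_keys _ _ _ _ _ (by simp [PySem.Dict.contains_insert_self]),
      PySem.Dict.keys_insert_of_not_contains _ _ h']
    have hnm : p.1 ∉ best.keys := fun hm => by
      rw [(PySem.Dict.contains_iff_mem_keys _ _).mpr hm] at h'
      cases h'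
    simp [PySem.Set.add, hnm]

theorem pvBestD_keys' (lp : List (String × List Int × List Int)) :
    ∀ d, (lp.foldl (fun best p => pvBStep p best) d).keys
      = PySem.Set.update d.keys (lp.map (·.1)) := by
  induction lp with
  | nil => intro d; simp [PySem.Set.update]
  | cons p lp ih =>
    intro d
    simp only [List.foldl_cons, List.map_cons]
    rw [ih, pvBStep_keys]
    rfl

theorem pvBestD_getD' (lp : List (String × List Int × List Int)) :
    ∀ d c, (lp.foldl (fun best p => pvBStep p best) d).getD c none
      = ((lp.filter (fun p => p.1 == c)).flatMap pvEP).foldl pvOStep (d.getD c none) := by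
  induction lp with
  | nil => intro d c; simp
  | cons p lp ih =>
    intro d c
    simp only [List.foldl_cons, List.filter_cons]
    by_cases h : p.1 = c
    · simp only [h, beq_self_eq_true, if_true, List.flatMap_cons, List.foldl_append]
      rw [ih, pvBStep_getD, if_pos h]
    · rw [if_neg (by simpa using h)]
      rw [ih, pvBStep_getD, if_neg h]

-- B's streaming fold over the pvG-image of a diff-record list computes A's chosen record
theorem pv_ofold_some (t : List PvDiff) (m : PvDiff) :
    (t.map pvG).foldl pvOStep (some (pvKey m.xor, m.idx, m.xor))
      = some (pvKey (t.foldl pvStep m).xor, (t.foldl pvStep m).idx, (t.foldl pvStep m).xor) := by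
  induction t generalizing m with
  | nil => rfl
  | cons d t ih =>
    simp only [List.map_cons, List.foldl_cons]
    rw [show pvOStep (some (pvKey m.xor, m.idx, m.xor)) (pvG d)
        = some (pvKey (pvStep m d).xor, (pvStep m d).idx, (pvStep m d).xor) from by
      simp only [pvOStep, pvG, pvStep]
      split <;> rfl]
    exact ih (pvStep m d)

theorem pv_ofold (l : List PvDiff) :
    (l.map pvG).foldl pvOStep none
      = (match l with
        | [] => none
        | d :: t =>
          some (pvKey ((t.foldl pvStep d).xor), (t.foldl pvStep d).idx, (t.foldl pvStep d).xor)) := by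
  cases l with
  | nil => rfl
  | cons d t =>
    simp only [List.map_cons, List.foldl_cons]
    rw [show pvOStep none (pvG d) = some (pvKey d.xor, d.idx, d.xor) from rfl]
    exact pv_ofold_some t d

theorem infer_eq (lp : List (String × List Int × List Int)) :
    infer_mappings_from_labeled_reports lp = infer_mappings_from_labeled_reports_alt lp := by
  have hA : infer_mappings_from_labeled_reports lp
      = (pv_infer_button_mappings (pvDictA lp)).items := rfl
  rw [hA, pv_alt_eq]
  -- keys of the two dicts agree and are Nodup
  have hkA : (pvDictA lp).keys = PySem.Set.update [] (lp.map (·.1)) := by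
    rw [pv_dictA_modify]
    simpa using PySem.Dict.keys_foldl_modify_key lp (·.1) [] (fun d p => (· ++ [pvGA p])) PySem.Dict.empty
  have hkB : (pvBestD lp).keys = PySem.Set.update [] (lp.map (·.1)) := by
    rw [pvBestD, pvBestD_keys']
    rfl
  have hnA : (pvDictA lp).keys.Nodup := by
    rw [pv_dictA_modify]
    exact PySem.Dict.nodup_keys_foldl_modify_key lp (·.1) [] (fun d p => (· ++ [pvGA p]))
      PySem.Dict.empty PySem.Dict.nodup_keys_empty
  have hnB : (pvBestD lp).keys.Nodup := by
    rw [hkB]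
    exact PySem.Set.nodup_update _ _ List.nodup_nil
  have hvA : ∀ c, (pvDictA lp).getD c [] = (lp.filter (fun p => p.1 == c)).flatMap (fun p => [pvGA p]) := by
    intro c; rw [pv_dictA_modify]
    simpa using pv_groupD (fun p => [pvGA p]) lp PySem.Dict.empty c
  have hvB : ∀ c, (pvBestD lp).getD c none
      = (((lp.filter (fun p => p.1 == c)).flatMap pvGA).map pvG).foldl pvOStep none := by
    intro c
    rw [pvBestD, pvBestD_getD', PySem.Dict.getD_empty, List.map_flatMap,
      show pvEP = (fun p => (pvGA p).map pvG) from funext pvEP_eq_map]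
  congr 1
  unfold pv_infer_button_mappings
  rw [PySem.Dict.items_eq_map_keys _ hnA [], PySem.Dict.items_eq_map_keys _ hnB none,
    List.foldl_map, List.foldl_map, hkA, hkB]
  congr 1
  funext mapping c
  rw [hvA c, hvB c]
  have hflat : ((lp.filter (fun p => p.1 == c)).flatMap (fun p => [pvGA p])).foldl
      (fun cs diffs => diffs.foldl (fun cs d => cs ++ [d]) cs) []
      = (lp.filter (fun p => p.1 == c)).flatMap pvGA := by
    rw [pv_cand, show ((lp.filter (fun p => p.1 == c)).flatMap (fun p => [pvGA p]))
        = (lp.filter (fun p => p.1 == c)).map pvGA from Eq.symm List.map_eq_flatMap]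
    simp [List.flatMap_def]
  show (match pv_choose_candidate (((lp.filter (fun p => p.1 == c)).flatMap (fun p => [pvGA p])).foldl
      (fun cs diffs => diffs.foldl (fun cs d => cs ++ [d]) cs) []) with
    | some cc => mapping.insert c [cc.1, cc.2]
    | none => mapping) = _
  rw [hflat, pv_choose_char, pv_ofold]
  cases hF : (lp.filter (fun p => p.1 == c)).flatMap pvGA with
  | nil => rfl
  | cons d t => simp [pvG]

-- ===== VERDICT (by name: the statement is the Claim_ definition above) =====
theorem infer_mappings_from_labeled_reports_spec : Claim_equal_infer_mappings_from_labeled_reports := by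
  intro lp _
  unfold Spec_infer_mappings_from_labeled_reports
  exact infer_eq lp
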